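-- pv_equiv track=rewrite | github.com/huaguduo12/TQFL1 | script.py | filter_and_sort_links
-- ===== SOURCE A (Python) =====
-- def filter_and_sort_links(all_links, country_order, limit):
--     grouped_links = {}
--     for link_info in all_links:
--         code = link_info['country_code']
--         if code not in grouped_links:
--             grouped_links[code] = []
--         grouped_links[code].append(link_info['link'])
--
--     sorted_and_filtered_links = []
--     for country_code in country_order:
--         if country_code in grouped_links:
--             unique_links = list(dict.fromkeys(grouped_links[country_code]))
--             sorted_and_filtered_links.extend(unique_links[:limit])
--
--     return sorted_and_filtered_links
-- ===== SOURCE B (Python) =====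
-- def filter_and_sort_links(all_links, country_order, limit):
--     result = []
--     for code in country_order:
--         links = [li['link'] for li in all_links if li['country_code'] == code]
--         result.extend(list(dict.fromkeys(links))[:limit])
--     return result
-- ===== Notes on version B (the rewrite author's own statement) =====
-- stated objective: alternative
-- what changed: Replaced the build-a-grouping-dict-then-index strategy by a direct per-country scan: for each country in country_order B filters all_links with a comprehension, dedupes with dict.fromkeys and slices to limit, with no dictionary of groups and no containment branch.
import Mathlib
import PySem

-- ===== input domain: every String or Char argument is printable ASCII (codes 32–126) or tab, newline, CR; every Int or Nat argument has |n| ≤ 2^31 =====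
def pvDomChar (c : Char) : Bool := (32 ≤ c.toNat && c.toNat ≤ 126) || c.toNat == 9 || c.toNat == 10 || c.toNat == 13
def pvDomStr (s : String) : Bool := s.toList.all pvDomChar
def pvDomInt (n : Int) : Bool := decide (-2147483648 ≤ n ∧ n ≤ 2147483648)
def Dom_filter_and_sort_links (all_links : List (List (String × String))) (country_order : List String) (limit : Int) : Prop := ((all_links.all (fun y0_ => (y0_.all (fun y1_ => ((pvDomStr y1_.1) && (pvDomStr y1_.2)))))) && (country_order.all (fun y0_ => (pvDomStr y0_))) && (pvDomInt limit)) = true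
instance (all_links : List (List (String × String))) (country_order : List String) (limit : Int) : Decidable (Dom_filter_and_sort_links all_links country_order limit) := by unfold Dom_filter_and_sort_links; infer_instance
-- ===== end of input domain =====

-- B replaces A's grouping dictionary by a direct filtering scan of all_links per country in
-- country_order (same output; a different decomposition, not claimed faster).

-- ===== PORT A =====
-- link_info['k'] is a first-match dict lookup; the "" default is only reached where Python
-- raises KeyError, which Pre_filter_and_sort_links excludes.
def filter_and_sort_links (all_links : List (List (String × String))) (country_order : List String) (limit : Int) : List String :=
  let grouped := all_links.foldl (fun g li =>
      let code := (PySem.Dict.mk li).getD "country_code" ""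
      let g' := if g.contains code then g else g.insert code ([] : List String)
      g'.modify code [] (fun l => l ++ [(PySem.Dict.mk li).getD "link" ""]))
    PySem.Dict.empty
  country_order.foldl (fun acc code =>
      if grouped.contains code then
        acc ++ PySem.List.slice (PySem.List.dedup (grouped.getD code [])) none (some limit)
      else acc) []

-- ===== PORT B =====
def filter_and_sort_links_alt (all_links : List (List (String × String))) (country_order : List String) (limit : Int) : List String :=
  country_order.foldl (fun result code =>
      result ++ PySem.List.slice (PySem.List.dedup
        ((all_links.filter (fun li => (PySem.Dict.mk li).getD "country_code" "" == code)).map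
          (fun li => (PySem.Dict.mk li).getD "link" ""))) none (some limit)) []

-- ===== PRECONDITION & SPEC =====
-- Pre_ excludes exactly the inputs on which Python A raises KeyError: a link_info dict missing
-- the 'country_code' or the 'link' key (A reads both keys of every entry).
def Pre_filter_and_sort_links (all_links : List (List (String × String))) (country_order : List String) (limit : Int) : Prop :=
  ∀ li ∈ all_links, (PySem.Dict.mk li).contains "country_code" = true ∧ (PySem.Dict.mk li).contains "link" = true
instance (all_links : List (List (String × String))) (country_order : List String) (limit : Int) : Decidable (Pre_filter_and_sort_links all_links country_order limit) := by unfold Pre_filter_and_sort_links; infer_instance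

def pvWitness_filter_and_sort_links : (List (List (String × String))) × List String × Int :=
  ([[("country_code", "US"), ("link", "a")], [("country_code", "DE"), ("link", "b")]], ["DE", "US"], 5)

def Spec_filter_and_sort_links (all_links : List (List (String × String))) (country_order : List String) (limit : Int) (out : List String) : Prop := out = filter_and_sort_links_alt all_links country_order limit
instance (all_links : List (List (String × String))) (country_order : List String) (limit : Int) (out : List String) : Decidable (Spec_filter_and_sort_links all_links country_order limit out) := by unfold Spec_filter_and_sort_links; infer_instance

-- ===== CLAIM (what is proved, stated in full; the proofs are below) =====
def Claim_equal_filter_and_sort_links : Prop := ∀ (all_links : List (List (String × String))) (country_order : List String) (limit : Int), Dom_filter_and_sort_links all_links country_order limit → Pre_filter_and_sort_links all_links country_order limit → Spec_filter_and_sort_links all_links country_order limit (filter_and_sort_links all_links country_order limit)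

-- ===== LEMMAS AND PROOFS =====

-- A's guarded "setdefault then append" step collapses to a plain modify.
theorem step_collapse (g : PySem.Dict String (List String)) (code : String) (v : String) :
    (if g.contains code then g else g.insert code ([] : List String)).modify code []
      (fun l => l ++ [v]) = g.modify code [] (fun l => l ++ [v]) := by
  by_cases h : g.contains code
  · simp [h]
  · simp only [h]
    simp [PySem.Dict.modify, PySem.Dict.getD_insert_self, PySem.Dict.insert_insert_self,
      PySem.Dict.getD_of_not_contains g ([] : List String) (by simpa using h)]

-- A's grouping dict looks up to exactly B's filtered scan.
theorem grouped_getD (all_links : List (List (String × String))) (code : String) :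
    (all_links.foldl (fun g li =>
        let c := (PySem.Dict.mk li).getD "country_code" ""
        let g' := if g.contains c then g else g.insert c ([] : List String)
        g'.modify c [] (fun l => l ++ [(PySem.Dict.mk li).getD "link" ""]))
      PySem.Dict.empty).getD code []
    = (all_links.filter (fun li => (PySem.Dict.mk li).getD "country_code" "" == code)).map
        (fun li => (PySem.Dict.mk li).getD "link" "") := by
  have hstep : (all_links.foldl (fun g li =>
        let c := (PySem.Dict.mk li).getD "country_code" ""
        let g' := if g.contains c then g else g.insert c ([] : List String)
        g'.modify c [] (fun l => l ++ [(PySem.Dict.mk li).getD "link" ""]))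
      PySem.Dict.empty)
      = ((all_links.map (fun li => ((PySem.Dict.mk li).getD "country_code" "",
            (PySem.Dict.mk li).getD "link" ""))).foldl
          (fun d p => d.modify p.1 [] (fun l => l ++ [p.2])) PySem.Dict.empty) := by
    rw [List.foldl_map]
    refine PySem.List.foldl_congr_mem _ _ _ _ (fun g li _ => ?_)
    simpa using step_collapse g ((PySem.Dict.mk li).getD "country_code" "")
      ((PySem.Dict.mk li).getD "link" "")
  rw [hstep, PySem.Dict.getD_foldl_modify_append, PySem.Dict.getD_empty]
  simp [List.filter_map, Function.comp_def]

theorem contains_false_sel_nil (all_links : List (List (String × String))) (code : String)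
    (h : (all_links.foldl (fun g li =>
        let c := (PySem.Dict.mk li).getD "country_code" ""
        let g' := if g.contains c then g else g.insert c ([] : List String)
        g'.modify c [] (fun l => l ++ [(PySem.Dict.mk li).getD "link" ""]))
      PySem.Dict.empty).contains code = false) :
    (all_links.filter (fun li => (PySem.Dict.mk li).getD "country_code" "" == code)).map
        (fun li => (PySem.Dict.mk li).getD "link" "") = [] := by
  rw [← grouped_getD]
  exact PySem.Dict.getD_of_not_contains _ ([] : List String) h

theorem slice_nil (limit : Int) : PySem.List.slice ([] : List String) none (some limit) = [] := by
  simp [PySem.List.slice]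

-- ===== VERDICT (by name: the statement is the Claim_ definition above) =====
theorem filter_and_sort_links_spec : Claim_equal_filter_and_sort_links := by
  intro all_links country_order limit _ _
  unfold Spec_filter_and_sort_links filter_and_sort_links filter_and_sort_links_alt
  refine PySem.List.foldl_congr_mem _ _ _ _ (fun acc code _ => ?_)
  by_cases h : (all_links.foldl (fun g li =>
      let c := (PySem.Dict.mk li).getD "country_code" ""
      let g' := if g.contains c then g else g.insert c ([] : List String)
      g'.modify c [] (fun l => l ++ [(PySem.Dict.mk li).getD "link" ""]))
    PySem.Dict.empty).contains code
  · simp only [h, if_true, grouped_getD]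
  · rw [if_neg (by simpa using h), contains_false_sel_nil all_links code (by simpa using h)]
    simp [PySem.List.dedup, slice_nil]
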